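-- pv_equiv track=rewrite | github.com/AStarySky/physics-based-3D-graph-visualizer | GraphPhysics.py | generate_cube_mesh
-- ===== SOURCE A (Python) =====
-- def generate_cube_mesh(side=4):
--     adj = {}
--     def get_id(x, y, z): return x * side**2 + y * side + z
--
--     for x in range(side):
--         for y in range(side):
--             for z in range(side):
--                 u = get_id(x, y, z)
--                 neighbors = []
--                 if x + 1 < side: neighbors.append(get_id(x+1, y, z))
--                 if y + 1 < side: neighbors.append(get_id(x, y+1, z))
--                 if z + 1 < side: neighbors.append(get_id(x, y, z+1))
--                 if x - 1 >= 0: neighbors.append(get_id(x-1, y, z))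
--                 if y - 1 >= 0: neighbors.append(get_id(x, y-1, z))
--                 if z - 1 >= 0: neighbors.append(get_id(x, y, z-1))
--                 adj[u] = neighbors
--     return adj
-- ===== SOURCE B (Python) =====
-- def generate_cube_mesh(side=4):
--     # Edge-list construction: materialize the three axis-aligned edge lists once,
--     # then build adj by six global append passes (forward +x,+y,+z, then backward
--     # -x,-y,-z); each pass touches every node at most once, so the per-node
--     # neighbor order [+x,+y,+z,-x,-y,-z] emerges from the pass order.
--     n = side * side * side
--     edges = [[(u, u + step) for u in range(n) if (u // step) % side < side - 1]
--              for step in (side * side, side, 1)]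
--     adj = {u: [] for u in range(n)}
--     for es in edges:
--         for u, v in es:
--             adj[u].append(v)
--     for es in edges:
--         for u, v in es:
--             adj[v].append(u)
--     return adj
-- ===== Notes on version B (the rewrite author's own statement) =====
-- stated objective: alternative
-- what changed: Replaces the per-node construction (triple-nested loop computing each node's full neighbor list with six bound checks) by an edge-list algorithm: the three axis-aligned edge lists are materialized once, an empty list is installed for every node, and the adjacency is then filled by six global append passes over the edge lists (forward +x,+y,+z then backward -x,-y,-z), the per-node neighbor order emerging from the pass order.
import Mathlib
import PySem

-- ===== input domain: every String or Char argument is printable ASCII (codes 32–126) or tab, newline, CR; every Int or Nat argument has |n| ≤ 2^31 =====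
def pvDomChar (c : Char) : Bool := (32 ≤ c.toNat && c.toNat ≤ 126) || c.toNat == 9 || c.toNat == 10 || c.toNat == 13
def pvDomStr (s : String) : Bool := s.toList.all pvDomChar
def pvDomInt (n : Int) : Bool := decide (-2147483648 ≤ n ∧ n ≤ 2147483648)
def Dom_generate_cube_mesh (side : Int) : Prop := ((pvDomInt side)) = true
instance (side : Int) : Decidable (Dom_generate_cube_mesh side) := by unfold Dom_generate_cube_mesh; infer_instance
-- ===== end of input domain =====

-- B builds the adjacency from explicit per-axis edge lists via six global append
-- passes instead of computing each node's neighbor list in one shot (objective: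
-- alternative algorithm, same asymptotic cost).

-- ===== PORT A =====
def generate_cube_mesh (side : Int) : List (Int × List Int) :=
  -- get_id x y z = x * side**2 + y * side + z
  ((PySem.List.pyRange 0 side 1).foldl (fun adj x =>
    (PySem.List.pyRange 0 side 1).foldl (fun adj y =>
      (PySem.List.pyRange 0 side 1).foldl (fun adj z =>
        let u := x * side ^ 2 + y * side + z
        let nb0 : List Int := []
        let nb1 := if x + 1 < side then nb0 ++ [(x+1) * side ^ 2 + y * side + z] else nb0
        let nb2 := if y + 1 < side then nb1 ++ [x * side ^ 2 + (y+1) * side + z] else nb1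
        let nb3 := if z + 1 < side then nb2 ++ [x * side ^ 2 + y * side + (z+1)] else nb2
        let nb4 := if 0 ≤ x - 1 then nb3 ++ [(x-1) * side ^ 2 + y * side + z] else nb3
        let nb5 := if 0 ≤ y - 1 then nb4 ++ [x * side ^ 2 + (y-1) * side + z] else nb4
        let nb6 := if 0 ≤ z - 1 then nb5 ++ [x * side ^ 2 + y * side + (z-1)] else nb5
        adj.insert u nb6) adj) adj)
    (PySem.Dict.empty : PySem.Dict Int (List Int))).items

-- ===== PORT B =====
-- edge lists per axis (guard `(u // step) % side < side - 1`), then adj[u] = [] for all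
-- u, then three forward append passes and three backward append passes over the edges
def generate_cube_mesh_alt (side : Int) : List (Int × List Int) :=
  let n := side * side * side
  let edges := ([side * side, side, 1] : List Int).map (fun step =>
    ((PySem.List.pyRange 0 n 1).filter
      (fun u => decide (PySem.Int.mod (PySem.Int.floordiv u step) side < side - 1))).map
      (fun u => (u, u + step)))
  let adj0 := (PySem.List.pyRange 0 n 1).foldl
      (fun d u => d.insert u ([] : List Int)) (PySem.Dict.empty : PySem.Dict Int (List Int))
  let adj1 := edges.foldl (fun adj es =>
      es.foldl (fun adj p => adj.modify p.1 [] (fun l => l ++ [p.2])) adj) adj0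
  let adj2 := edges.foldl (fun adj es =>
      es.foldl (fun adj p => adj.modify p.2 [] (fun l => l ++ [p.1])) adj) adj1
  adj2.items

-- ===== PRECONDITION & SPEC =====
def Spec_generate_cube_mesh (side : Int) (out : List (Int × List Int)) : Prop := out = generate_cube_mesh_alt side
instance (side : Int) (out : List (Int × List Int)) : Decidable (Spec_generate_cube_mesh side out) := by unfold Spec_generate_cube_mesh; infer_instance

-- ===== CLAIM (what is proved, stated in full; the proofs are below) =====
def Claim_equal_generate_cube_mesh : Prop := ∀ (side : Int), Dom_generate_cube_mesh side → Spec_generate_cube_mesh side (generate_cube_mesh side)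

-- ===== LEMMAS AND PROOFS =====

-- a fold over a flatMap is the nested fold
theorem pvFoldlFlatMap {a b g : Type} (l : List a) (f : a -> List b) (F : g -> b -> g) (d : g) :
    (l.flatMap f).foldl F d = l.foldl (fun d x => (f x).foldl F d) d := by
  induction l generalizing d with
  | nil => rfl
  | cons x t ih => simp [List.flatMap_cons, List.foldl_append, ih]

theorem pvNestedFold {g : Type} (l : List Int) (F : g -> (Int × Int × Int) -> g) (d : g) :
    (l.flatMap (fun x => l.flatMap (fun y => l.map (fun z => (x, y, z))))).foldl F d
      = l.foldl (fun d x => l.foldl (fun d y => l.foldl (fun d z => F d (x, y, z)) d) d) d := by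
  rw [pvFoldlFlatMap]
  refine PySem.List.foldl_congr_mem _ _ _ _ ?_
  intro acc x _
  rw [pvFoldlFlatMap]
  refine PySem.List.foldl_congr_mem _ _ _ _ ?_
  intro acc2 y _
  rw [List.foldl_map]

-- the lexicographic triples of [0, s)^3, A's iteration order
def pvTriples (s : Int) : List (Int × Int × Int) :=
  (PySem.List.pyRange 0 s 1).flatMap (fun x =>
    (PySem.List.pyRange 0 s 1).flatMap (fun y =>
      (PySem.List.pyRange 0 s 1).map (fun z => (x, y, z))))

def pvKey (s : Int) (t : Int × Int × Int) : Int := t.1 * s ^ 2 + t.2.1 * s + t.2.2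

-- A's neighbor list at a triple
def pvValA (s : Int) (t : Int × Int × Int) : List Int :=
  let x := t.1; let y := t.2.1; let z := t.2.2
  let nb0 : List Int := []
  let nb1 := if x + 1 < s then nb0 ++ [(x+1) * s ^ 2 + y * s + z] else nb0
  let nb2 := if y + 1 < s then nb1 ++ [x * s ^ 2 + (y+1) * s + z] else nb1
  let nb3 := if z + 1 < s then nb2 ++ [x * s ^ 2 + y * s + (z+1)] else nb2
  let nb4 := if 0 ≤ x - 1 then nb3 ++ [(x-1) * s ^ 2 + y * s + z] else nb3
  let nb5 := if 0 ≤ y - 1 then nb4 ++ [x * s ^ 2 + (y-1) * s + z] else nb4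
  if 0 ≤ z - 1 then nb5 ++ [x * s ^ 2 + y * s + (z-1)] else nb5

theorem pvRangeMul (a b : Nat) :
    List.range (a * b) = (List.range a).flatMap (fun i => (List.range b).map (fun j => i * b + j)) := by
  induction a with
  | zero => simp
  | succ a ih =>
    rw [Nat.succ_mul, List.range_add, ih, List.range_succ, List.flatMap_append]
    simp

-- the ids of the triples, in order, are exactly range(side^3)
theorem pvMapKeyTriples (n : Nat) :
    (pvTriples (n : Int)).map (pvKey (n : Int)) = PySem.List.pyRange 0 ((n : Int) * n * n) 1 := by
  have hc : ((n : Int) * n * n) = ((n * n * n : Nat) : Int) := by push_cast; ring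
  rw [hc, PySem.List.pyRange_one]
  simp only [Int.sub_zero, Int.toNat_natCast]
  rw [show n * n * n = (n * n) * n from rfl, pvRangeMul (n * n) n, pvRangeMul n n]
  unfold pvTriples pvKey
  rw [PySem.List.pyRange_one]
  simp only [List.flatMap_map, List.map_flatMap, List.map_map, List.flatMap_assoc]
  apply List.flatMap_congr
  intro x _
  apply List.flatMap_congr
  intro y _
  apply List.map_congr_left
  intro z _
  simp only [Function.comp]
  push_cast
  ring

theorem pvMemTriples {s : Int} {t : Int × Int × Int} (h : t ∈ pvTriples s) :
    0 ≤ t.1 ∧ t.1 < s ∧ 0 ≤ t.2.1 ∧ t.2.1 < s ∧ 0 ≤ t.2.2 ∧ t.2.2 < s := by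
  unfold pvTriples at h
  simp only [List.mem_flatMap, List.mem_map, PySem.List.mem_pyRange_one] at h
  obtain ⟨x, hx, y, hy, z, hz, rfl⟩ := h
  exact ⟨hx.1, hx.2, hy.1, hy.2, hz.1, hz.2⟩

-- A's port as the items of a fold over the triple list
theorem pvAfold (s : Int) :
    generate_cube_mesh s
      = ((pvTriples s).foldl (fun adj t => adj.insert (pvKey s t) (pvValA s t))
          (PySem.Dict.empty : PySem.Dict Int (List Int))).items := by
  unfold generate_cube_mesh pvTriples
  rw [pvNestedFold]
  rfl

-- A's items: one (key, valA) pair per triple, in order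
theorem pvAitems (n : Nat) :
    generate_cube_mesh (n : Int)
      = (pvTriples (n : Int)).map (fun t => (pvKey (n : Int) t, pvValA (n : Int) t)) := by
  rw [pvAfold]
  rw [PySem.Dict.items_foldl_insert_fresh (pvTriples (n : Int)) (pvKey (n : Int)) (pvValA (n : Int)) _
        (by intro a _; rfl)
        (by rw [pvMapKeyTriples]; exact PySem.List.nodup_pyRange_one 0 _)]
  rfl

-- ---- B-side structure ----

-- the nodes with room for a forward step of stride s (stride side² ↔ x, side ↔ y, 1 ↔ z)
def pvM (side s : Int) : List Int :=
  (PySem.List.pyRange 0 (side * side * side) 1).filter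
    (fun u => decide (PySem.Int.mod (PySem.Int.floordiv u s) side < side - 1))

def pvAdj0 (side : Int) : PySem.Dict Int (List Int) :=
  (PySem.List.pyRange 0 (side * side * side) 1).foldl
    (fun d u => d.insert u ([] : List Int)) PySem.Dict.empty

def pvFwd (side s : Int) (d : PySem.Dict Int (List Int)) : PySem.Dict Int (List Int) :=
  ((pvM side s).map (fun w => (w, w + s))).foldl
    (fun adj p => adj.modify p.1 [] (fun l => l ++ [p.2])) d

def pvBwd (side s : Int) (d : PySem.Dict Int (List Int)) : PySem.Dict Int (List Int) :=
  ((pvM side s).map (fun w => (w, w + s))).foldl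
    (fun adj p => adj.modify p.2 [] (fun l => l ++ [p.1])) d

def pvFinal (side : Int) : PySem.Dict Int (List Int) :=
  pvBwd side 1 (pvBwd side side (pvBwd side (side * side)
    (pvFwd side 1 (pvFwd side side (pvFwd side (side * side) (pvAdj0 side))))))

theorem pvBeq (side : Int) : generate_cube_mesh_alt side = (pvFinal side).items := rfl

-- ---- floor-division arithmetic on layered ids ----

theorem pvFD {b a r : Int} (hb : 0 < b) (hr0 : 0 ≤ r) (hr : r < b) :
    PySem.Int.floordiv (a * b + r) b = a := by
  rw [PySem.Int.floordiv_eq_iff_of_pos hb]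
  constructor <;> nlinarith

theorem pvMOD {b a r : Int} (hb : 0 < b) (hr0 : 0 ≤ r) (hr : r < b) :
    PySem.Int.mod (a * b + r) b = r := by
  have h := PySem.Int.floordiv_mul_add_mod (a * b + r) b
  rw [pvFD hb hr0 hr] at h
  omega

theorem pvCoord {side s a b r : Int} (hside : 0 < side) (hs : 0 < s)
    (hb0 : 0 ≤ b) (hb : b < side) (hr0 : 0 ≤ r) (hr : r < s) :
    PySem.Int.mod (PySem.Int.floordiv ((a * side + b) * s + r) s) side = b := by
  rw [pvFD hs hr0 hr]
  exact pvMOD hside hb0 hb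

theorem pvMemM {side s u : Int} :
    u ∈ pvM side s ↔ (0 ≤ u ∧ u < side * side * side)
      ∧ PySem.Int.mod (PySem.Int.floordiv u s) side < side - 1 := by
  simp [pvM, List.mem_filter, PySem.List.mem_pyRange_one]

theorem pvNodupM (side s : Int) : (pvM side s).Nodup :=
  (PySem.List.nodup_pyRange_one 0 _).filter _

theorem pvMemFwd {side s c a b r : Int} (hn : side * side * side = c * side * s)
    (hside : 0 < side) (hs : 0 < s) (_hc : 0 < c) (ha0 : 0 ≤ a) (hac : a < c)
    (hb0 : 0 ≤ b) (hb : b < side) (hr0 : 0 ≤ r) (hr : r < s) :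
    ((a * side + b) * s + r ∈ pvM side s) ↔ b + 1 < side := by
  rw [pvMemM, pvCoord hside hs hb0 hb hr0 hr]
  constructor
  · intro h; omega
  · intro h
    refine ⟨⟨by nlinarith [mul_nonneg (show (0:Int) ≤ a * side + b by nlinarith) hs.le], ?_⟩, by omega⟩
    rw [hn]
    nlinarith [mul_le_mul_of_nonneg_right (show a * side + b ≤ c * side - 1 by nlinarith) (le_of_lt hs)]

theorem pvMemBack {side s c a b r : Int} (hn : side * side * side = c * side * s)
    (hside : 0 < side) (hs : 0 < s) (_hc : 0 < c) (ha0 : 0 ≤ a) (hac : a < c)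
    (hb0 : 0 ≤ b) (hb : b < side) (hr0 : 0 ≤ r) (hr : r < s) :
    ((a * side + b) * s + r - s ∈ pvM side s) ↔ 1 ≤ b := by
  by_cases h1 : 1 ≤ b
  · have he : (a * side + b) * s + r - s = (a * side + (b - 1)) * s + r := by ring
    rw [he, pvMemM, pvCoord hside hs (by omega) (by omega) hr0 hr]
    simp only [h1, iff_true]
    refine ⟨⟨by nlinarith [mul_nonneg (show (0:Int) ≤ a * side + (b - 1) by nlinarith) hs.le], ?_⟩, by omega⟩
    rw [hn]
    nlinarith [mul_le_mul_of_nonneg_right (show a * side + (b - 1) ≤ c * side - 1 by nlinarith) (le_of_lt hs)]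
  · have hb0' : b = 0 := by omega
    subst hb0'
    simp only [h1, iff_false]
    by_cases ha1 : 1 ≤ a
    · have he : (a * side + 0) * s + r - s = ((a - 1) * side + (side - 1)) * s + r := by ring
      rw [he, pvMemM, pvCoord hside hs (by omega) (by omega) hr0 hr]
      intro h
      exact absurd h.2 (by omega)
    · have ha0' : a = 0 := by omega
      subst ha0'
      rw [pvMemM]
      intro h
      have h2 : (0 : Int) ≤ (0 * side + 0) * s + r - s := h.1.1
      have h3 : ((0 : Int) * side + 0) * s + r - s = r - s := by ring
      rw [h3] at h2
      omega

-- extracting the single matching node of a nodup list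
theorem pvFilterOne {m : List Int} (hm : m.Nodup) (u : Int) :
    m.filter (fun w => w == u) = if u ∈ m then [u] else [] := by
  rw [List.filter_beq]
  by_cases h : u ∈ m
  · rw [if_pos h, List.count_eq_one_of_mem hm h, List.replicate_one]
  · rw [if_neg h, List.count_eq_zero_of_not_mem h, List.replicate_zero]

theorem pvFilterPair {m : List Int} (hm : m.Nodup) (s u : Int) :
    (((m.map (fun w => (w, w + s))).filter (fun p => p.1 == u)).map (fun p => p.2))
      = if u ∈ m then [u + s] else [] := by
  rw [List.filter_map]
  have hcomp : ((fun p : Int × Int => p.1 == u) ∘ (fun w : Int => (w, w + s))) = (fun w => w == u) := rfl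
  rw [hcomp, List.map_map, pvFilterOne hm u]
  by_cases h : u ∈ m <;> simp [h]

theorem pvFilterPairSwap {m : List Int} (hm : m.Nodup) (s u : Int) :
    (((m.map (fun w => (w + s, w))).filter (fun p => p.1 == u)).map (fun p => p.2))
      = if u - s ∈ m then [u - s] else [] := by
  rw [List.filter_map]
  have hcomp : ((fun p : Int × Int => p.1 == u) ∘ (fun w : Int => (w + s, w))) = (fun w => w + s == u) := rfl
  rw [hcomp, List.filter_congr (l := m) (p := fun w => w + s == u) (q := fun w => w == u - s)
        (by intro w _; rw [Bool.eq_iff_iff]; simp only [beq_iff_eq]; omega)]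
  rw [List.map_map, pvFilterOne hm (u - s)]
  by_cases h : u - s ∈ m <;> simp [h]

-- getD through the passes
theorem pvGetDFwd (side s : Int) (d : PySem.Dict Int (List Int)) (u : Int) :
    (pvFwd side s d).getD u [] = d.getD u [] ++ (if u ∈ pvM side s then [u + s] else []) := by
  unfold pvFwd
  rw [PySem.Dict.getD_foldl_modify_append, pvFilterPair (pvNodupM side s) s u]

theorem pvBwdMapSwap (side s : Int) (d : PySem.Dict Int (List Int)) :
    pvBwd side s d
      = ((pvM side s).map (fun w => (w + s, w))).foldl
          (fun adj p => adj.modify p.1 [] (fun l => l ++ [p.2])) d := by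
  unfold pvBwd
  rw [List.foldl_map, List.foldl_map]

theorem pvGetDBwd (side s : Int) (d : PySem.Dict Int (List Int)) (u : Int) :
    (pvBwd side s d).getD u [] = d.getD u [] ++ (if u - s ∈ pvM side s then [u - s] else []) := by
  rw [pvBwdMapSwap, PySem.Dict.getD_foldl_modify_append, pvFilterPairSwap (pvNodupM side s) s u]

-- the initial dict: every grid id maps to []
theorem pvAdj0Items (side : Int) :
    (pvAdj0 side).items
      = (PySem.List.pyRange 0 (side * side * side) 1).map (fun u => (u, ([] : List Int))) := by
  unfold pvAdj0
  rw [PySem.Dict.items_foldl_insert_fresh _ (fun u => u) (fun _ => ([] : List Int)) _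
        (by intro a _; rfl)
        (by simpa using PySem.List.nodup_pyRange_one 0 (side * side * side))]
  rfl

theorem pvAdj0Keys (side : Int) :
    (pvAdj0 side).keys = PySem.List.pyRange 0 (side * side * side) 1 := by
  show (pvAdj0 side).items.map (fun p => p.1) = _
  rw [pvAdj0Items, List.map_map]
  exact List.map_id' _

theorem pvAdj0GetD {side u : Int} (hu : u ∈ PySem.List.pyRange 0 (side * side * side) 1) :
    (pvAdj0 side).getD u [] = [] := by
  refine PySem.Dict.getD_of_mem_items _ ?_ ?_ []
  · rw [pvAdj0Items]
    exact List.mem_map.mpr ⟨u, hu, rfl⟩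
  · rw [pvAdj0Keys]; exact PySem.List.nodup_pyRange_one 0 _

-- keys survive the passes
theorem pvUpdateSelf {s : List Int} {xs : List Int} (h : ∀ x ∈ xs, x ∈ s) :
    PySem.Set.update s xs = s := by
  rw [PySem.Set.update_eq_append_filter]
  have hnil : ((PySem.Set.ofList xs).filter (fun y => !PySem.Set.contains s y)) = [] := by
    rw [List.filter_eq_nil_iff]
    intro y hy
    have hmem : y ∈ s := h y ((PySem.Set.mem_ofList _ _).mp hy)
    simpa using hmem
  rw [hnil, List.append_nil]

theorem pvKeysFwd {side s : Int} {d : PySem.Dict Int (List Int)}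
    (h : ∀ w ∈ pvM side s, w ∈ d.keys) : (pvFwd side s d).keys = d.keys := by
  unfold pvFwd
  rw [PySem.Dict.keys_foldl_modify_key]
  refine pvUpdateSelf ?_
  intro v hv
  rw [List.map_map] at hv
  obtain ⟨w, hw, rfl⟩ := List.mem_map.mp hv
  exact h w hw

theorem pvKeysBwd {side s : Int} {d : PySem.Dict Int (List Int)}
    (h : ∀ w ∈ pvM side s, w + s ∈ d.keys) : (pvBwd side s d).keys = d.keys := by
  rw [pvBwdMapSwap, PySem.Dict.keys_foldl_modify_key]
  refine pvUpdateSelf ?_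
  intro v hv
  rw [List.map_map] at hv
  obtain ⟨w, hw, rfl⟩ := List.mem_map.mp hv
  exact h w hw

-- a forward step from an interior node stays inside the grid
theorem pvStepInRange {side s c w : Int} (hn : side * side * side = c * side * s)
    (hside : 0 < side) (hs : 0 < s) (_hc : 0 < c) (hw : w ∈ pvM side s) :
    0 ≤ w + s ∧ w + s < side * side * side := by
  rw [pvMemM] at hw
  obtain ⟨⟨hw0, hwn⟩, hcond⟩ := hw
  set q := PySem.Int.floordiv w s with hq
  set r := PySem.Int.mod w s with hr
  have hqr : q * s + r = w := PySem.Int.floordiv_mul_add_mod w s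
  have hr0 : 0 ≤ r := PySem.Int.mod_nonneg w hs
  have hrs : r < s := PySem.Int.mod_lt w hs
  set a := PySem.Int.floordiv q side with ha
  set b := PySem.Int.mod q side with hb
  have hab : a * side + b = q := PySem.Int.floordiv_mul_add_mod q side
  have hb0 : 0 ≤ b := PySem.Int.mod_nonneg q hside
  have hbs : b < side := PySem.Int.mod_lt q hside
  have hbcond : b < side - 1 := hcond
  have hq0 : 0 ≤ q := by nlinarith
  have hqlt : q < c * side := by rw [hn] at hwn; nlinarith
  have hac : a < c := by nlinarith
  refine ⟨by omega, ?_⟩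
  rw [hn]
  have hws : w + s = (a * side + (b + 1)) * s + r := by rw [← hqr, ← hab]; ring
  rw [hws]
  nlinarith [mul_le_mul_of_nonneg_right (show a * side + (b + 1) ≤ c * side - 1 by nlinarith) (le_of_lt hs)]

theorem pvKeysFinal (side : Int) (hside : 0 < side) :
    (pvFinal side).keys = PySem.List.pyRange 0 (side * side * side) 1 := by
  have hmemR : ∀ s : Int, ∀ w ∈ pvM side s, w ∈ PySem.List.pyRange 0 (side * side * side) 1 := by
    intro s w hw
    rw [pvMemM] at hw
    exact PySem.List.mem_pyRange_one.mpr ⟨hw.1.1, hw.1.2⟩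
  have hstep : ∀ s c : Int, side * side * side = c * side * s → 0 < s → 0 < c →
      ∀ w ∈ pvM side s, w + s ∈ PySem.List.pyRange 0 (side * side * side) 1 := by
    intro s c hn hs hc w hw
    exact PySem.List.mem_pyRange_one.mpr (pvStepInRange hn hside hs hc hw)
  have k0 : (pvAdj0 side).keys = PySem.List.pyRange 0 (side * side * side) 1 := pvAdj0Keys side
  have k1 : (pvFwd side (side * side) (pvAdj0 side)).keys
      = PySem.List.pyRange 0 (side * side * side) 1 := by
    rw [pvKeysFwd (fun w hw => by rw [k0]; exact hmemR _ w hw), k0]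
  have k2 : (pvFwd side side (pvFwd side (side * side) (pvAdj0 side))).keys
      = PySem.List.pyRange 0 (side * side * side) 1 := by
    rw [pvKeysFwd (fun w hw => by rw [k1]; exact hmemR _ w hw), k1]
  have k3 : (pvFwd side 1 (pvFwd side side (pvFwd side (side * side) (pvAdj0 side)))).keys
      = PySem.List.pyRange 0 (side * side * side) 1 := by
    rw [pvKeysFwd (fun w hw => by rw [k2]; exact hmemR _ w hw), k2]
  have k4 : (pvBwd side (side * side)
      (pvFwd side 1 (pvFwd side side (pvFwd side (side * side) (pvAdj0 side))))).keys
      = PySem.List.pyRange 0 (side * side * side) 1 := by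
    rw [pvKeysBwd (fun w hw => by
          rw [k3]; exact hstep (side * side) 1 (by ring) (by positivity) one_pos w hw), k3]
  have k5 : (pvBwd side side (pvBwd side (side * side)
      (pvFwd side 1 (pvFwd side side (pvFwd side (side * side) (pvAdj0 side)))))).keys
      = PySem.List.pyRange 0 (side * side * side) 1 := by
    rw [pvKeysBwd (fun w hw => by
          rw [k4]; exact hstep side side (by ring) hside hside w hw), k4]
  show (pvBwd side 1 (pvBwd side side (pvBwd side (side * side)
      (pvFwd side 1 (pvFwd side side (pvFwd side (side * side) (pvAdj0 side))))))).keys = _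
  rw [pvKeysBwd (fun w hw => by
        rw [k5]; exact hstep 1 (side * side) (by ring) one_pos (by positivity) w hw), k5]

-- central: the final dict's value at a grid key is A's neighbor list
set_option maxHeartbeats 1000000 in
theorem pvGetDVal (side : Int) (hside : 0 < side) (t : Int × Int × Int)
    (ht : t ∈ pvTriples side) :
    (pvFinal side).getD (pvKey side t) [] = pvValA side t := by
  obtain ⟨x, y, z⟩ := t
  obtain ⟨hx0, hxs, hy0, hys, hz0, hzs⟩ := pvMemTriples ht
  simp only at hx0 hxs hy0 hys hz0 hzs
  set u := pvKey side (x, y, z) with hu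
  have hux : u = (0 * side + x) * (side * side) + (y * side + z) := by rw [hu]; unfold pvKey; ring
  have huy : u = (x * side + y) * side + z := by rw [hu]; unfold pvKey; ring
  have huz : u = ((x * side + y) * side + z) * 1 + 0 := by rw [hu]; unfold pvKey; ring
  have hm1 : (u ∈ pvM side (side * side)) ↔ x + 1 < side := by
    rw [hux]
    exact pvMemFwd (c := 1) (by ring) hside (by positivity) one_pos le_rfl one_pos hx0 hxs
      (by nlinarith) (by nlinarith)
  have hm2 : (u ∈ pvM side side) ↔ y + 1 < side := by
    rw [huy]
    exact pvMemFwd (c := side) (by ring) hside hside hside hx0 hxs hy0 hys hz0 hzs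
  have hm3 : (u ∈ pvM side 1) ↔ z + 1 < side := by
    rw [huz]
    exact pvMemFwd (c := side * side) (by ring) hside one_pos (by positivity) (by nlinarith) (by nlinarith)
      hz0 hzs le_rfl one_pos
  have hb1 : (u - side * side ∈ pvM side (side * side)) ↔ 1 ≤ x := by
    rw [hux]
    exact pvMemBack (c := 1) (by ring) hside (by positivity) one_pos le_rfl one_pos hx0 hxs
      (by nlinarith) (by nlinarith)
  have hb2 : (u - side ∈ pvM side side) ↔ 1 ≤ y := by
    rw [huy]
    exact pvMemBack (c := side) (by ring) hside hside hside hx0 hxs hy0 hys hz0 hzs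
  have hb3 : (u - 1 ∈ pvM side 1) ↔ 1 ≤ z := by
    rw [huz]
    exact pvMemBack (c := side * side) (by ring) hside one_pos (by positivity) (by nlinarith) (by nlinarith)
      hz0 hzs le_rfl one_pos
  have huR : u ∈ PySem.List.pyRange 0 (side * side * side) 1 := by
    refine PySem.List.mem_pyRange_one.mpr ⟨?_, ?_⟩
    · rw [hu]; unfold pvKey; simp only; nlinarith
    · rw [hu]; unfold pvKey; simp only; nlinarith
  have e1 : u + side * side = (x + 1) * side ^ 2 + y * side + z := by rw [hu]; unfold pvKey; ring
  have e2 : u + side = x * side ^ 2 + (y + 1) * side + z := by rw [hu]; unfold pvKey; ring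
  have e3 : u + 1 = x * side ^ 2 + y * side + (z + 1) := by rw [hu]; unfold pvKey; ring
  have e4 : u - side * side = (x - 1) * side ^ 2 + y * side + z := by rw [hu]; unfold pvKey; ring
  have e5 : u - side = x * side ^ 2 + (y - 1) * side + z := by rw [hu]; unfold pvKey; ring
  have e6 : u - 1 = x * side ^ 2 + y * side + (z - 1) := by rw [hu]; unfold pvKey; ring
  have c4 : (1 ≤ x) = (0 ≤ x - 1) := by simp only [eq_iff_iff]; omega
  have c5 : (1 ≤ y) = (0 ≤ y - 1) := by simp only [eq_iff_iff]; omega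
  have c6 : (1 ≤ z) = (0 ≤ z - 1) := by simp only [eq_iff_iff]; omega
  unfold pvFinal
  rw [pvGetDBwd, pvGetDBwd, pvGetDBwd, pvGetDFwd, pvGetDFwd, pvGetDFwd, pvAdj0GetD huR]
  simp only [hm1, hm2, hm3, hb1, hb2, hb3]
  simp only [e1, e2, e3, e4, e5, e6, c4, c5, c6]
  unfold pvValA
  simp only [List.nil_append]
  split_ifs <;> rfl

theorem pvSpecPos (n : Nat) (hn : 0 < n) :
    generate_cube_mesh (n : Int) = generate_cube_mesh_alt (n : Int) := by
  have hside : (0 : Int) < (n : Int) := by exact_mod_cast hn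
  rw [pvAitems, pvBeq]
  rw [PySem.Dict.items_eq_map_keys (pvFinal (n : Int))
        (by rw [pvKeysFinal _ hside]; exact PySem.List.nodup_pyRange_one 0 _) []]
  rw [pvKeysFinal _ hside, ← pvMapKeyTriples n, List.map_map]
  refine List.map_congr_left ?_
  intro t ht
  simp only [Function.comp]
  rw [pvGetDVal _ hside t ht]

-- ===== VERDICT (by name: the statement is the Claim_ definition above) =====
theorem generate_cube_mesh_spec : Claim_equal_generate_cube_mesh := by
  intro side _
  unfold Spec_generate_cube_mesh
  by_cases h : 0 < side
  · obtain ⟨n, rfl⟩ := Int.eq_ofNat_of_zero_le (le_of_lt h)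
    exact pvSpecPos n (by exact_mod_cast h)
  · have h1 : PySem.List.pyRange 0 side 1 = [] := PySem.List.pyRange_one_eq_nil (by omega)
    have h2 : PySem.List.pyRange 0 (side * side * side) 1 = [] :=
      PySem.List.pyRange_one_eq_nil (by nlinarith [sq_nonneg side, mul_self_nonneg side])
    simp only [generate_cube_mesh, generate_cube_mesh_alt, h1, h2, List.foldl_nil,
      List.filter_nil, List.map_nil, List.map_cons, List.foldl_cons]
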